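-- pv_equiv track=rewrite | github.com/maniero/SOpt | Python/String/IsUpper.py | contaMaiuscula
-- ===== SOURCE A (Python) =====
-- def contaMaiuscula(string):
--     mai = 0
--     min = 0
--     for c in string:
--         if c.isupper():
--             mai += 1
--         else:
--             min += 1
--     return mai, min
-- ===== SOURCE B (Python) =====
-- def contaMaiuscula(string):
--     # Build a character histogram in one pass, then classify the distinct
--     # characters only (one is-upper test per distinct char, not per char).
--     freq = {}
--     for c in string:
--         freq[c] = freq.get(c, 0) + 1
--     mai = 0
--     total = 0
--     for ch, n in freq.items():
--         total += n
--         if ch.isupper():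
--             mai += n
--     return mai, total - mai
-- ===== Notes on version B (the rewrite author's own statement) =====
-- stated objective: alternative
-- what changed: B first builds a character-frequency dictionary and then sums the counts of the distinct keys, testing isupper once per distinct character and deriving the non-upper count by subtraction, instead of A's per-character branching two-counter loop.
import Mathlib
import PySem

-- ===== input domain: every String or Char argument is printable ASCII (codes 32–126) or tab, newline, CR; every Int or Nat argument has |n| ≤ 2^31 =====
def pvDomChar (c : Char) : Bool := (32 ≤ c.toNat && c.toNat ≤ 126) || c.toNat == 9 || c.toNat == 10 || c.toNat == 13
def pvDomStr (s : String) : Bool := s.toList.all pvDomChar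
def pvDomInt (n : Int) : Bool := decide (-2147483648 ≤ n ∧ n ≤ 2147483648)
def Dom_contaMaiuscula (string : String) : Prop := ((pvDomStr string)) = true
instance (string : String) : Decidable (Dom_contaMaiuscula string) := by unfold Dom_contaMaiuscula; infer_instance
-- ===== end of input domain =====

-- B builds a character histogram first and classifies only the distinct characters,
-- deriving the non-upper count by subtraction (objective: alternative algorithm).

-- ===== PORT A =====
-- two counters updated in a branching loop over the characters
def contaMaiuscula (string : String) : Int × Int :=
  string.toList.foldl
    (fun (st : Int × Int) c => if PySem.Chars.isupper c then (st.1 + 1, st.2) else (st.1, st.2 + 1))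
    (0, 0)

-- ===== PORT B =====
-- pass 1: freq[c] = freq.get(c, 0) + 1; pass 2 over freq.items(): total += n, mai += n if ch.isupper()
def contaMaiuscula_alt (string : String) : Int × Int :=
  let freq : PySem.Dict Char Int :=
    string.toList.foldl (fun d c => d.insert c (d.getD c 0 + 1)) PySem.Dict.empty
  let mt : Int × Int :=
    freq.items.foldl
      (fun (st : Int × Int) p =>
        let st' := (st.1, st.2 + p.2)
        if PySem.Chars.isupper p.1 then (st'.1 + p.2, st'.2) else st')
      (0, 0)
  (mt.1, mt.2 - mt.1)

-- ===== PRECONDITION & SPEC =====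
def Spec_contaMaiuscula (string : String) (out : Int × Int) : Prop := out = contaMaiuscula_alt string
instance (string : String) (out : Int × Int) : Decidable (Spec_contaMaiuscula string out) := by unfold Spec_contaMaiuscula; infer_instance

-- ===== CLAIM (what is proved, stated in full; the proofs are below) =====
def Claim_equal_contaMaiuscula : Prop := ∀ (string : String), Dom_contaMaiuscula string → Spec_contaMaiuscula string (contaMaiuscula string)

-- ===== LEMMAS AND PROOFS =====

-- A's pair fold is (m + #upper, n + #non-upper)
theorem pv_fold_pair (l : List Char) (m n : Int) :
    l.foldl (fun (st : Int × Int) c => if PySem.Chars.isupper c then (st.1 + 1, st.2) else (st.1, st.2 + 1)) (m, n)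
      = (m + l.countP PySem.Chars.isupper, n + (l.countP (fun c => ! PySem.Chars.isupper c))) := by
  induction l generalizing m n with
  | nil => simp
  | cons c t ih =>
    by_cases h : PySem.Chars.isupper c = true
    · simp only [List.foldl_cons, h, if_true, ih, List.countP_cons, Bool.not_true, Prod.mk.injEq]
      refine ⟨by push_cast; ring, rfl⟩
    · simp only [List.foldl_cons, h, ih, List.countP_cons, Bool.not_false, Prod.mk.injEq]
      refine ⟨by simp, by simp; ring⟩

-- B's items fold accumulates the upper-keyed counts and the total of all counts
theorem pv_items_fold (L : List (Char × Int)) (m n : Int) :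
    L.foldl
      (fun (st : Int × Int) p =>
        let st' := (st.1, st.2 + p.2)
        if PySem.Chars.isupper p.1 then (st'.1 + p.2, st'.2) else st')
      (m, n)
      = (m + ((L.filter (fun p => PySem.Chars.isupper p.1)).map (·.2)).sum,
         n + (L.map (·.2)).sum) := by
  induction L generalizing m n with
  | nil => simp
  | cons p t ih =>
    by_cases h : PySem.Chars.isupper p.1 = true
    · simp only [List.foldl_cons, h, if_true, ih, List.filter_cons, List.map_cons, List.sum_cons,
        Prod.mk.injEq]
      exact ⟨by ring, by ring⟩
    · simp only [List.foldl_cons, h, if_false, ih, List.filter_cons, List.map_cons, List.sum_cons,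
        Bool.false_eq_true, Prod.mk.injEq]
      exact ⟨trivial, by ring⟩

-- PySem's first-occurrence dedup is a permutation of Mathlib's last-occurrence dedup
theorem pv_ofList_perm_dedup (l : List Char) : (PySem.Set.ofList l).Perm l.dedup := by
  refine List.perm_of_nodup_nodup_toFinset_eq (PySem.Set.nodup_ofList l) l.nodup_dedup ?_
  ext c
  simp [PySem.Set.mem_ofList, List.mem_dedup]

-- summing counts over the filtered distinct characters is countP
theorem pv_sum_filtered (l : List Char) (p : Char → Bool) :
    ((((PySem.Set.ofList l).filter p).map (fun k => ((l.count k : Int)))).sum : Int)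
      = (l.countP p : Int) := by
  have hperm := ((pv_ofList_perm_dedup l).filter p).map (fun k => ((l.count k : Int)))
  rw [hperm.sum_eq, ← List.sum_map_count_dedup_filter_eq_countP p l, Nat.cast_list_sum,
    List.map_map]
  rfl

theorem pv_spec (string : String) : contaMaiuscula string = contaMaiuscula_alt string := by
  unfold contaMaiuscula contaMaiuscula_alt
  rw [pv_fold_pair]
  simp only [PySem.Dict.foldl_insert_getD_add_one_eq_counter, PySem.Dict.items_counter,
    pv_items_fold, List.filter_map, List.map_map]
  have hupper :
      (((PySem.Set.ofList string.toList).filter ((fun p => PySem.Chars.isupper p.1) ∘ fun k => (k, (string.toList.count k : Int)))).map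
        ((·.2) ∘ fun k => (k, (string.toList.count k : Int)))).sum
        = (string.toList.countP PySem.Chars.isupper : Int) := by
    simpa [Function.comp] using pv_sum_filtered string.toList PySem.Chars.isupper
  have htotal :
      (((PySem.Set.ofList string.toList)).map ((·.2) ∘ fun k => (k, (string.toList.count k : Int)))).sum
        = (string.toList.length : Int) := by
    simpa [Function.comp, List.countP_true] using pv_sum_filtered string.toList (fun _ => true)
  rw [hupper, htotal]
  have hsplit : (string.toList.countP (fun c => ! PySem.Chars.isupper c) : Int)
      = (string.toList.length : Int) - (string.toList.countP PySem.Chars.isupper : Int) := by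
    have h1 := List.length_eq_countP_add_countP (l := string.toList) (p := PySem.Chars.isupper)
    have h2 : string.toList.countP (fun c => ! PySem.Chars.isupper c)
        = string.toList.countP (fun a => decide ¬ PySem.Chars.isupper a = true) :=
      List.countP_congr (by intro a _; simp)
    rw [h2]
    omega
  rw [hsplit]
  simp only [Prod.mk.injEq]
  exact ⟨trivial, by ring⟩

-- ===== VERDICT (by name: the statement is the Claim_ definition above) =====
theorem contaMaiuscula_spec : Claim_equal_contaMaiuscula := by
  intro s _
  unfold Spec_contaMaiuscula
  exact pv_spec s
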